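-- pv_equiv track=rewrite | github.com/daggerstuff/pixelated | scripts/training/evaluate_repetition.py | max_consecutive_word_repeat
-- ===== SOURCE A (Python) =====
-- def max_consecutive_word_repeat(words: list[str]) -> int:
--     if not words:
--         return 0
--
--     current = 1
--     best = 1
--     for idx in range(1, len(words)):
--         if words[idx] == words[idx - 1]:
--             current += 1
--             if current > best:
--                 best = current
--         else:
--             current = 1
--
--     return best
-- ===== SOURCE B (Python) =====
-- def max_consecutive_word_repeat(words: list[str]) -> int:
--     # Boundary method: collect the positions where adjacent words differ; the
--     # answer is the largest gap between consecutive boundaries (0 and n included).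
--     n = len(words)
--     if n == 0:
--         return 0
--     bounds = [0] + [i for i in range(1, n) if words[i] != words[i - 1]] + [n]
--     return max(b - a for a, b in zip(bounds, bounds[1:]))
-- ===== Notes on version B (the rewrite author's own statement) =====
-- stated objective: alternative
-- what changed: A keeps a running current/best repeat counter updated in one pass; B instead collects the boundary positions where adjacent words differ and returns the largest gap between consecutive boundaries (0 and n included).
import Mathlib
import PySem

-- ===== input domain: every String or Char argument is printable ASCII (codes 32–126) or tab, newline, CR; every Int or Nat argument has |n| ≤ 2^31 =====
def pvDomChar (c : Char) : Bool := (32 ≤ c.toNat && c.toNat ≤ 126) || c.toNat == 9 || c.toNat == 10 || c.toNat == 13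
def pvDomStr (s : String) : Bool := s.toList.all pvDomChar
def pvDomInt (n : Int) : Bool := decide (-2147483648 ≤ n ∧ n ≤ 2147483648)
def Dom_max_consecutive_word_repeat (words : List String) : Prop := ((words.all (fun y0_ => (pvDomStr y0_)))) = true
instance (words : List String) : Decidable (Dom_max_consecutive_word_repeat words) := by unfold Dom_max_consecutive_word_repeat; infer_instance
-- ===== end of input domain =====

-- B replaces A's running current/best repeat counter by the boundary method:
-- collect the positions where adjacent words differ, answer = largest gap
-- between consecutive boundaries (0 and n included); same O(n) cost.

-- ===== PORT A =====
-- loop body of A: for idx in range(1, len(words)) over state (current, best)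
def pvBodyA (words : List String) (s : Int × Int) (idx : Int) : Int × Int :=
  if PySem.List.pyGetD words idx "" = PySem.List.pyGetD words (idx - 1) "" then
    let current := s.1 + 1
    if current > s.2 then (current, current) else (current, s.2)
  else (1, s.2)

def max_consecutive_word_repeat (words : List String) : Int :=
  if words.isEmpty then 0
  else ((PySem.List.pyRange 1 (words.length : Int) 1).foldl (pvBodyA words) (1, 1)).2

-- ===== PORT B =====
def max_consecutive_word_repeat_alt (words : List String) : Int :=
  let n : Int := words.length
  if n = 0 then 0
  else
    let bounds : List Int :=
      0 :: (PySem.List.pyRange 1 n 1).filter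
        (fun i => PySem.List.pyGetD words i "" != PySem.List.pyGetD words (i - 1) "") ++ [n]
    let gaps : List Int := List.zipWith (fun a b => b - a) bounds bounds.tail
    -- bounds has ≥ 2 elements here, so gaps is nonempty and Python's max never raises
    (PySem.List.max? gaps (fun y => y)).getD 0

-- ===== PRECONDITION & SPEC =====
def Spec_max_consecutive_word_repeat (words : List String) (out : Int) : Prop := out = max_consecutive_word_repeat_alt words
instance (words : List String) (out : Int) : Decidable (Spec_max_consecutive_word_repeat words out) := by unfold Spec_max_consecutive_word_repeat; infer_instance

-- ===== CLAIM (what is proved, stated in full; the proofs are below) =====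
def Claim_equal_max_consecutive_word_repeat : Prop := ∀ (words : List String), Dom_max_consecutive_word_repeat words → Spec_max_consecutive_word_repeat words (max_consecutive_word_repeat words)

-- ===== LEMMAS AND PROOFS =====

-- A's loop, rephrased as structural recursion on the tail with the previous word carried along
def pvLoop (prev : String) (rest : List String) (s : Int × Int) : Int × Int :=
  match rest with
  | [] => s
  | x :: xs =>
      pvLoop x xs
        (if x = prev then
          (if s.1 + 1 > s.2 then (s.1 + 1, s.1 + 1) else (s.1 + 1, s.2))
        else (1, s.2))

-- lengths of the maximal runs (proof-only bridge between the two ports)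
def pvRuns : String → Nat → List String → List Nat
  | _,    k, []      => [k]
  | prev, k, w :: ws => if w = prev then pvRuns prev (k + 1) ws else k :: pvRuns w 1 ws

-- B's comprehension, rephrased as structural recursion carrying the previous word and position
def pvCuts : String → List String → Int → List Int
  | _,    [],      _   => []
  | prev, x :: xs, pos => if x = prev then pvCuts x xs (pos + 1) else pos :: pvCuts x xs (pos + 1)

theorem pvRange_shift (n : Int) :
    PySem.List.pyRange 2 n 1 = (PySem.List.pyRange 1 (n - 1) 1).map (· + 1) := by
  rw [PySem.List.pyRange_one, PySem.List.pyRange_one, List.map_map]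
  have h : (n - 2).toNat = (n - 1 - 1).toNat := by omega
  rw [h]
  exact List.map_congr_left (fun k _ => by simp [Function.comp]; ring)

theorem pvFoldlEqLoop (rest : List String) : ∀ (prev : String) (s : Int × Int),
    (PySem.List.pyRange 1 (1 + (rest.length : Int)) 1).foldl (pvBodyA (prev :: rest)) s
      = pvLoop prev rest s := by
  induction rest with
  | nil => intro prev s; simp [pvLoop]
  | cons x xs ih =>
    intro prev s
    have hlt : (1 : Int) < 1 + ((x :: xs).length : Int) := by
      simp only [List.length_cons]; push_cast; omega
    rw [PySem.List.pyRange_one_cons hlt]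
    simp only [List.foldl_cons]
    have hb1 : pvBodyA (prev :: x :: xs) s 1
        = (if x = prev then
            (if s.1 + 1 > s.2 then (s.1 + 1, s.1 + 1) else (s.1 + 1, s.2))
          else (1, s.2)) := by
      simp [pvBodyA, PySem.List.pyGetD]
    have hsh : (1 : Int) + 1 = 2 := by norm_num
    have hn : (1 : Int) + ((x :: xs).length : Int) - 1 = 1 + (xs.length : Int) := by
      simp only [List.length_cons]; push_cast; omega
    rw [hb1, hsh, pvRange_shift, hn, List.foldl_map]
    rw [PySem.List.foldl_congr_mem (g := pvBodyA (x :: xs))]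
    · rw [ih]; simp [pvLoop]
    · intro acc i hi
      rw [PySem.List.mem_pyRange_one] at hi
      obtain ⟨m, rfl⟩ : ∃ m : Nat, i = ((m : Int) + 1) := ⟨(i - 1).toNat, by omega⟩
      have e1 : (m : Int) + 1 + 1 = ((m + 2 : Nat) : Int) := by push_cast; ring
      have e2 : (m : Int) + 1 + 1 - 1 = ((m + 1 : Nat) : Int) := by push_cast; ring
      have e3 : (m : Int) + 1 - 1 = ((m : Nat) : Int) := by ring
      have c1 : PySem.List.pyGetD (prev :: x :: xs) ((m : Int) + 1 + 1) "" = xs.getD m "" := by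
        rw [e1, PySem.List.pyGetD_natCast]; simp only [List.getD_cons_succ]
      have c2 : PySem.List.pyGetD (prev :: x :: xs) ((m : Int) + 1 + 1 - 1) "" = (x :: xs).getD m "" := by
        rw [e2, PySem.List.pyGetD_natCast]; simp only [List.getD_cons_succ]
      have c3 : PySem.List.pyGetD (x :: xs) ((m : Int) + 1) "" = xs.getD m "" := by
        rw [show ((m : Int) + 1) = ((m + 1 : Nat) : Int) from by push_cast; ring,
          PySem.List.pyGetD_natCast]
        simp only [List.getD_cons_succ]
      have c4 : PySem.List.pyGetD (x :: xs) ((m : Int) + 1 - 1) "" = (x :: xs).getD m "" := by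
        rw [e3, PySem.List.pyGetD_natCast]
      simp only [pvBodyA, c1, c2, c3, c4]

theorem pvRuns_first_le (xs : List String) : ∀ (w : String) (k : Nat),
    k ≤ (pvRuns w k xs).foldl Nat.max 0 := by
  induction xs with
  | nil => intro w k; simp [pvRuns]
  | cons x xs ih =>
    intro w k
    by_cases h : x = w
    · simp only [pvRuns, if_pos h]
      exact le_trans (Nat.le_succ k) (ih w (k + 1))
    · simp only [pvRuns, if_neg h, List.foldl_cons]
      have hmono : ∀ (l : List Nat) (a : Nat), a ≤ l.foldl Nat.max a := by
        intro l; induction l with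
        | nil => simp
        | cons b bs ihl => intro a; exact le_trans (Nat.le_max_left a b) (ihl _)
      exact le_trans (Nat.le_max_right 0 k) (hmono _ _)

theorem foldl_max_cons (l : List Nat) : ∀ (a b : Nat),
    l.foldl Nat.max (Nat.max a b) = Nat.max a (l.foldl Nat.max b) := by
  induction l with
  | nil => intro a b; rfl
  | cons c cs ih =>
    intro a b
    simp only [List.foldl_cons]
    have h : (Nat.max a b).max c = Nat.max a (Nat.max b c) := Nat.max_assoc a b c
    rw [h, ih]

theorem pvLoopEqRuns (xs : List String) : ∀ (prev : String) (k : Nat) (best : Int),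
    1 ≤ k → (k : Int) ≤ best →
    (pvLoop prev xs ((k : Int), best)).2 = max best (((pvRuns prev k xs).foldl Nat.max 0 : Nat) : Int) := by
  induction xs with
  | nil =>
    intro prev k best hk hkb
    simp only [pvLoop, pvRuns, List.foldl_cons, List.foldl_nil]
    have hconv : ∀ a b : Nat, Nat.max a b = max a b := fun _ _ => rfl
    simp only [hconv]
    omega
  | cons x xs ih =>
    intro prev k best hk hkb
    by_cases h : x = prev
    · subst h
      simp only [pvLoop, pvRuns, if_true]
      have hstate : (if (k : Int) + 1 > best then ((k : Int) + 1, (k : Int) + 1) else ((k : Int) + 1, best))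
          = (((k + 1 : Nat) : Int), max best ((k + 1 : Nat) : Int)) := by
        split_ifs with hc <;> simp only [Prod.mk.injEq] <;> push_cast <;> omega
      rw [hstate, ih x (k + 1) _ (by omega) (le_max_right _ _)]
      have hF := pvRuns_first_le xs x (k + 1)
      push_cast
      omega
    · simp only [pvLoop, pvRuns, if_neg h]
      rw [show ((1 : Int), best) = (((1 : Nat) : Int), best) from by norm_num]
      rw [ih x 1 best (by omega) (by omega)]
      simp only [List.foldl_cons]
      have hz : Nat.max 0 k = Nat.max k 0 := Nat.max_comm 0 k
      rw [hz, foldl_max_cons]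
      have hconv : ∀ a b : Nat, Nat.max a b = max a b := fun _ _ => rfl
      simp only [hconv]
      omega

-- pvCuts shifts with its position argument
theorem pvCuts_shift (ws : List String) : ∀ (prev : String) (pos : Int),
    pvCuts prev ws (pos + 1) = (pvCuts prev ws pos).map (· + 1) := by
  induction ws with
  | nil => intro prev pos; simp [pvCuts]
  | cons x xs ih =>
    intro prev pos
    by_cases h : x = prev <;> simp [pvCuts, h, ih]

-- B's filtered comprehension equals the structural pvCuts
theorem pvFilterEqCuts (rest : List String) : ∀ (prev : String),
    (PySem.List.pyRange 1 (1 + (rest.length : Int)) 1).filter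
      (fun i => PySem.List.pyGetD (prev :: rest) i "" != PySem.List.pyGetD (prev :: rest) (i - 1) "")
      = pvCuts prev rest 1 := by
  induction rest with
  | nil => intro prev; simp [pvCuts, PySem.List.pyRange_one_eq_nil]
  | cons x xs ih =>
    intro prev
    have hlt : (1 : Int) < 1 + ((x :: xs).length : Int) := by
      simp only [List.length_cons]; push_cast; omega
    rw [PySem.List.pyRange_one_cons hlt]
    simp only [List.filter_cons]
    have hn : (1 : Int) + ((x :: xs).length : Int) - 1 = 1 + (xs.length : Int) := by
      simp only [List.length_cons]; push_cast; omega
    have hsh : (1 : Int) + 1 = 2 := by norm_num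
    rw [hsh, pvRange_shift, hn, List.filter_map]
    have hcongr : List.filter
        ((fun i => PySem.List.pyGetD (prev :: x :: xs) i "" != PySem.List.pyGetD (prev :: x :: xs) (i - 1) "") ∘ (· + 1))
        (PySem.List.pyRange 1 (1 + (xs.length : Int)) 1)
        = List.filter
        (fun i => PySem.List.pyGetD (x :: xs) i "" != PySem.List.pyGetD (x :: xs) (i - 1) "")
        (PySem.List.pyRange 1 (1 + (xs.length : Int)) 1) := by
      apply List.filter_congr
      intro i hi
      rw [PySem.List.mem_pyRange_one] at hi
      obtain ⟨m, rfl⟩ : ∃ m : Nat, i = ((m : Int) + 1) := ⟨(i - 1).toNat, by omega⟩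
      have e1 : (m : Int) + 1 + 1 = ((m + 2 : Nat) : Int) := by push_cast; ring
      have e2 : (m : Int) + 1 + 1 - 1 = ((m + 1 : Nat) : Int) := by push_cast; ring
      have e3 : (m : Int) + 1 - 1 = ((m : Nat) : Int) := by ring
      have c1 : PySem.List.pyGetD (prev :: x :: xs) ((m : Int) + 1 + 1) "" = xs.getD m "" := by
        rw [e1, PySem.List.pyGetD_natCast]; simp only [List.getD_cons_succ]
      have c2 : PySem.List.pyGetD (prev :: x :: xs) ((m : Int) + 1 + 1 - 1) "" = (x :: xs).getD m "" := by
        rw [e2, PySem.List.pyGetD_natCast]; simp only [List.getD_cons_succ]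
      have c3 : PySem.List.pyGetD (x :: xs) ((m : Int) + 1) "" = xs.getD m "" := by
        rw [show ((m : Int) + 1) = ((m + 1 : Nat) : Int) from by push_cast; ring,
          PySem.List.pyGetD_natCast]
        simp only [List.getD_cons_succ]
      have c4 : PySem.List.pyGetD (x :: xs) ((m : Int) + 1 - 1) "" = (x :: xs).getD m "" := by
        rw [e3, PySem.List.pyGetD_natCast]
      simp only [Function.comp, c1, c2, c3, c4]
    rw [hcongr, ih x]
    have hpred1 : (PySem.List.pyGetD (prev :: x :: xs) 1 "" != PySem.List.pyGetD (prev :: x :: xs) (1 - 1) "")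
        = !(decide (x = prev)) := by
      by_cases hx : x = prev <;> simp [PySem.List.pyGetD, bne, hx]
    rw [hpred1]
    have hsh2 : (pvCuts x xs 1).map (· + 1) = pvCuts x xs 2 := by
      rw [show (2 : Int) = 1 + 1 from by norm_num, pvCuts_shift]
    by_cases h : x = prev
    · subst h; simp [pvCuts, hsh2]
    · simp [pvCuts, h, hsh2]

-- gaps between consecutive boundaries are exactly the run lengths
theorem pvGapsEqRuns (ws : List String) : ∀ (prev : String) (a pos : Int), a < pos →
    List.zipWith (fun a b => b - a)
      (a :: pvCuts prev ws pos ++ [pos + (ws.length : Int)])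
      ((a :: pvCuts prev ws pos ++ [pos + (ws.length : Int)]).tail)
      = (pvRuns prev (pos - a).toNat ws).map (fun k : Nat => (k : Int)) := by
  induction ws with
  | nil =>
    intro prev a pos hap
    simp only [pvCuts, pvRuns, List.length_nil, Int.natCast_zero, add_zero, List.map_cons]
    show [pos - a] = [((pos - a).toNat : Int)]
    congr 1
    omega
  | cons x xs ih =>
    intro prev a pos hap
    by_cases h : x = prev
    · subst h
      simp only [pvCuts, pvRuns, if_true]
      have hlen : pos + ((x :: xs).length : Int) = (pos + 1) + (xs.length : Int) := by
        simp only [List.length_cons]; push_cast; ring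
      rw [hlen, ih x a (pos + 1) (by omega),
        show ((pos + 1) - a).toNat = (pos - a).toNat + 1 from by omega]
    · simp only [pvCuts, pvRuns, if_neg h]
      have hlen : pos + ((x :: xs).length : Int) = (pos + 1) + (xs.length : Int) := by
        simp only [List.length_cons]; push_cast; ring
      simp only [List.cons_append, List.tail_cons, List.zipWith_cons_cons, List.map_cons]
      have hih := ih x pos (pos + 1) (by omega)
      simp only [List.cons_append, List.tail_cons] at hih
      rw [hlen, hih, show ((pos + 1) - pos).toNat = 1 from by omega]
      congr 1
      omega

-- running Int max of a casted Nat list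
theorem foldl_max_int_cast (l : List Nat) : ∀ (a : Nat),
    (l.map (fun k : Nat => (k : Int))).foldl max (a : Int) = ((l.foldl Nat.max a : Nat) : Int) := by
  induction l with
  | nil => intro a; rfl
  | cons b bs ih =>
    intro a
    simp only [List.map_cons, List.foldl_cons]
    rw [show max (a : Int) ((b : Nat) : Int) = (((Nat.max a b) : Nat) : Int) from (Nat.cast_max a b).symm]
    exact ih (a.max b)

-- pvRuns is never empty
theorem pvRuns_ne_nil (xs : List String) : ∀ (w : String) (k : Nat), pvRuns w k xs ≠ [] := by
  induction xs with
  | nil => intro w k; simp [pvRuns]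
  | cons x xs ih =>
    intro w k
    by_cases h : x = w <;> simp [pvRuns, h, ih]

-- B's port computes the max of the run lengths
theorem pvAltEqRunsMax (w : String) (ws : List String) :
    max_consecutive_word_repeat_alt (w :: ws)
      = (((pvRuns w 1 ws).foldl Nat.max 0 : Nat) : Int) := by
  unfold max_consecutive_word_repeat_alt
  have hne : ¬ (((w :: ws).length : Nat) : Int) = 0 := by
    simp only [List.length_cons]; push_cast; omega
  simp only [hne]
  have hlen : (((w :: ws).length : Nat) : Int) = 1 + (ws.length : Int) := by
    simp only [List.length_cons]; push_cast; ring
  rw [hlen, pvFilterEqCuts ws w]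
  have hg := pvGapsEqRuns ws w 0 1 (by omega)
  rw [hg]
  obtain ⟨r, rs, hr⟩ : ∃ r rs, pvRuns w ((1 : Int) - 0).toNat ws = r :: rs := by
    cases hx : pvRuns w ((1 : Int) - 0).toNat ws with
    | nil => exact absurd hx (pvRuns_ne_nil ws w _)
    | cons r rs => exact ⟨r, rs, rfl⟩
  rw [hr]
  simp only [List.map_cons]
  rw [PySem.List.max?_id_cons]
  simp only [Option.getD_some]
  rw [foldl_max_int_cast]
  have h10 : ((1 : Int) - 0).toNat = 1 := by norm_num
  rw [h10] at hr
  rw [hr]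
  simp [List.foldl_cons]

-- ===== VERDICT (by name: the statement is the Claim_ definition above) =====
theorem max_consecutive_word_repeat_spec : Claim_equal_max_consecutive_word_repeat := by
  intro words _
  unfold Spec_max_consecutive_word_repeat max_consecutive_word_repeat
  match words with
  | [] => simp [max_consecutive_word_repeat_alt]
  | w :: ws =>
    simp only [List.isEmpty_cons, if_neg (by simp : ¬ (false = true))]
    have hlen : (((w :: ws).length : Nat) : Int) = 1 + (ws.length : Int) := by simp; omega
    rw [hlen, pvFoldlEqLoop ws w (1, 1)]
    rw [show ((1 : Int), (1 : Int)) = (((1 : Nat) : Int), (1 : Int)) by norm_num]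
    rw [pvLoopEqRuns ws w 1 1 (by omega) (by omega)]
    have := pvRuns_first_le ws w 1
    rw [pvAltEqRunsMax w ws]
    omega
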